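-- pv_equiv track=rewrite | github.com/Benjamin-gogo/machine-learning | datasetMaker.py | getIndexOfTeam
-- ===== SOURCE A (Python) =====
-- def getIndexOfTeam(teams, team1, team2):
--     ind1 = 0
--     ind2 = 0
--
--     for i in range(len(teams)):
--         if teams[i] == team1:
--             ind1 = i
--         if teams[i] == team2:
--             ind2 = i
--
--     return ind1, ind2
-- ===== SOURCE B (Python) =====
-- def getIndexOfTeam(teams, team1, team2):
--     def last_index(t):
--         for i in range(len(teams) - 1, -1, -1):
--             if teams[i] == t:
--                 return i
--         return 0
--     return last_index(team1), last_index(team2)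
-- ===== Notes on version B (the rewrite author's own statement) =====
-- stated objective: idiomatic
-- what changed: Replaces the single forward full scan that keeps overwriting both indices with a per-team backward scan that stops at the first (i.e. last) match, via a shared helper.
import Mathlib
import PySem

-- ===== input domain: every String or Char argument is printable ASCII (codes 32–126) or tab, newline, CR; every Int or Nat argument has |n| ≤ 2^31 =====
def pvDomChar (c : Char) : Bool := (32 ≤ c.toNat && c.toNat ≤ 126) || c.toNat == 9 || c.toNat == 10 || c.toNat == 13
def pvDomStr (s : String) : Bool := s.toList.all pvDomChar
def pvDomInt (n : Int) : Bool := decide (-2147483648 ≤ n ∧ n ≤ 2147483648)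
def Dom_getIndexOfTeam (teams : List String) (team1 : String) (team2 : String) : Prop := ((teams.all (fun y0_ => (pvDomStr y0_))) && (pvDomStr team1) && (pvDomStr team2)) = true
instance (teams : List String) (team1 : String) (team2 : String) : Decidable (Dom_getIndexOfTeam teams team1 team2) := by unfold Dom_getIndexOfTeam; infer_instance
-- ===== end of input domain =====

-- B finds each team's last index by a backward scan with early exit (per-team helper) instead of A's forward overwrite scan; objective: idiomatic.


-- ===== PORT A =====
-- forward scan over all indices, overwriting ind1/ind2 on every match
def getIndexOfTeam (teams : List String) (team1 : String) (team2 : String) : Int × Int :=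
  (List.range teams.length).foldl
    (fun (p : Int × Int) i =>
      let p1 := if teams.getD i "" = team1 then ((i : Int), p.2) else p
      if teams.getD i "" = team2 then (p1.1, (i : Int)) else p1)
    (0, 0)

-- ===== PORT B =====
-- backward scan: fuel = one past the current index; stops at the first match from the end
def pvLastIdx (teams : List String) (t : String) : Nat → Int
  | 0 => 0
  | (i+1) => if teams.getD i "" = t then (i : Int) else pvLastIdx teams t i

def getIndexOfTeam_alt (teams : List String) (team1 : String) (team2 : String) : Int × Int :=
  (pvLastIdx teams team1 teams.length, pvLastIdx teams team2 teams.length)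

-- ===== PRECONDITION & SPEC =====
def Spec_getIndexOfTeam (teams : List String) (team1 : String) (team2 : String) (out : Int × Int) : Prop := out = getIndexOfTeam_alt teams team1 team2
instance (teams : List String) (team1 : String) (team2 : String) (out : Int × Int) : Decidable (Spec_getIndexOfTeam teams team1 team2 out) := by unfold Spec_getIndexOfTeam; infer_instance

-- ===== CLAIM (what is proved, stated in full; the proofs are below) =====
def Claim_equal_getIndexOfTeam : Prop := ∀ (teams : List String) (team1 : String) (team2 : String), Dom_getIndexOfTeam teams team1 team2 → Spec_getIndexOfTeam teams team1 team2 (getIndexOfTeam teams team1 team2)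

-- ===== LEMMAS AND PROOFS =====
theorem foldl_range_eq_lastIdx (teams : List String) (t1 t2 : String) (n : Nat) :
    (List.range n).foldl
      (fun (p : Int × Int) i =>
        let p1 := if teams.getD i "" = t1 then ((i : Int), p.2) else p
        if teams.getD i "" = t2 then (p1.1, (i : Int)) else p1)
      (0, 0) = (pvLastIdx teams t1 n, pvLastIdx teams t2 n) := by
  induction n with
  | zero => simp [pvLastIdx]
  | succ n ih =>
    rw [List.range_succ, List.foldl_append, ih]
    simp only [List.foldl_cons, List.foldl_nil, pvLastIdx]
    split_ifs <;> simp

-- ===== VERDICT (by name: the statement is the Claim_ definition above) =====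
theorem getIndexOfTeam_spec : Claim_equal_getIndexOfTeam := by
  intro teams t1 t2 _
  unfold Spec_getIndexOfTeam getIndexOfTeam getIndexOfTeam_alt
  exact foldl_range_eq_lastIdx teams t1 t2 teams.length
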